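-- pv_equiv track=rewrite | github.com/dpl10/BAD2matrix | utils.py | max_steps_char
-- ===== SOURCE A (Python) =====
-- nucl_amb_codes = {
-- 	'R': ['A' , 'G'],
-- 	'Y': ['C' , 'T'],
-- 	'S': ['G' , 'C'],
-- 	'W': ['A' , 'T'],
-- 	'K': ['G' , 'T'],
-- 	'M': ['A' , 'C'],
-- 	'B': ['C' , 'G' , 'T'],
-- 	'D': ['A' , 'G' , 'T'],
-- 	'H': ['A' , 'C' , 'T'],
-- 	'V': ['A' , 'C' , 'G'],
-- 	'N': ['A' , 'C' , 'G' , 'T']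
-- }
--
-- prot_amb_codes = {
-- 	'B': ['D', 'N'],
-- 	'J': ['I', 'L'],
-- 	'X': ['A', 'C', 'D', 'E', 'F', 'G', 'H', 'I', 'K', 'L', 'M', 'N', 'P',
-- 		  'Q', 'R', 'S', 'T', 'V', 'W', 'Y'],
-- 	'Z': ['E', 'Q']
-- }
--
-- def max_steps_char(count_dict, char_type):
--
-- 	max_steps = None
--
-- 	if char_type in ['nucleic', 'peptidic']:
-- 		stand_states = None
-- 		projector = None
--
-- 		if char_type == 'nucleic':
-- 			stand_states = ['A', 'C', 'G', 'T']
-- 			projector = nucl_amb_codes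
-- 		elif char_type == 'peptidic':
-- 			stand_states = ['A', 'C', 'D', 'E', 'F', 'G', 'H', 'I', 'K', 'L',
-- 				'M', 'N', 'P', 'Q', 'R', 'S', 'T', 'V', 'W', 'Y']
-- 			projector = prot_amb_codes
--
-- 		count_dict = {x: count_dict[x] for x in sorted(count_dict, reverse=True, key=lambda y: count_dict[y])}
-- 		new_count = {x: count_dict[x] for x in count_dict if x in stand_states} #stand_states?
-- 		ambs = {x: count_dict[x] for x in count_dict if not x in stand_states}
--
-- 		to_rm = [0]
-- 		while len(to_rm) > 0:
-- 			to_rm = []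
-- 			break_ext = False
-- 			for amb in ambs:
-- 				for sym in new_count:
-- 					if sym in projector[amb]:
-- 						new_count[sym] += ambs[amb]
-- 						to_rm.append(amb)
-- 						break_ext = True
-- 						break
-- 				if break_ext: break
-- 			ambs = {x: ambs[x] for x in ambs if not x in to_rm}
--
-- 		if len(ambs) > 0:
-- 			new_count.update(ambs)
-- 			new_count = {x: new_count[x] for x in sorted(new_count, reverse=True, key=lambda y: new_count[y])}
--
-- 		max_steps = sum(list(new_count.values())[1:])
--
-- 	else:
-- 		count_dict = {x: count_dict[x] for x in sorted(count_dict, reverse=True, key=lambda y: count_dict[y])}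
--
-- 		max_steps = sum(list(count_dict.values())[1:])
--
-- 	return max_steps
-- ===== SOURCE B (Python) =====
-- nucl_amb_codes = {
-- 	'R': ['A' , 'G'],
-- 	'Y': ['C' , 'T'],
-- 	'S': ['G' , 'C'],
-- 	'W': ['A' , 'T'],
-- 	'K': ['G' , 'T'],
-- 	'M': ['A' , 'C'],
-- 	'B': ['C' , 'G' , 'T'],
-- 	'D': ['A' , 'G' , 'T'],
-- 	'H': ['A' , 'C' , 'T'],
-- 	'V': ['A' , 'C' , 'G'],
-- 	'N': ['A' , 'C' , 'G' , 'T']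
-- }
--
-- prot_amb_codes = {
-- 	'B': ['D', 'N'],
-- 	'J': ['I', 'L'],
-- 	'X': ['A', 'C', 'D', 'E', 'F', 'G', 'H', 'I', 'K', 'L', 'M', 'N', 'P',
-- 		  'Q', 'R', 'S', 'T', 'V', 'W', 'Y'],
-- 	'Z': ['E', 'Q']
-- }
--
-- def max_steps_char(count_dict, char_type):
-- 	# One descending stable sort of the items, then a SINGLE pass folding each
-- 	# ambiguity code into the first present standard state it projects onto.
-- 	items = sorted(count_dict.items(), key=lambda kv: kv[1], reverse=True)
-- 	if char_type == 'nucleic':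
-- 		stand = ['A', 'C', 'G', 'T']
-- 		projector = nucl_amb_codes
-- 	elif char_type == 'peptidic':
-- 		stand = ['A', 'C', 'D', 'E', 'F', 'G', 'H', 'I', 'K', 'L',
-- 				 'M', 'N', 'P', 'Q', 'R', 'S', 'T', 'V', 'W', 'Y']
-- 		projector = prot_amb_codes
-- 	else:
-- 		return sum(v for _, v in items[1:])
-- 	new_count = [[k, v] for k, v in items if k in stand]
-- 	rest = []
-- 	for k, v in items:
-- 		if k in stand:
-- 			continue
-- 		for cell in new_count:
-- 			if cell[0] in projector[k]:
-- 				cell[1] += v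
-- 				break
-- 		else:
-- 			rest.append(v)
-- 	vals = [v for _, v in new_count] + rest
-- 	if rest:
-- 		vals = sorted(vals, reverse=True)
-- 	return sum(vals[1:])
-- ===== Notes on version B (the rewrite author's own statement) =====
-- stated objective: simpler
-- what changed: A's while-loop restarts from the top of the remaining ambiguity codes after every single merge and rebuilds the ambs dict each pass; B does one stable descending sort of the items and a single for-pass that folds each ambiguity count into the first present standard state, collecting never-matching codes; the final tail-sum is taken from a plain sort of the values.
import Mathlib
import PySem

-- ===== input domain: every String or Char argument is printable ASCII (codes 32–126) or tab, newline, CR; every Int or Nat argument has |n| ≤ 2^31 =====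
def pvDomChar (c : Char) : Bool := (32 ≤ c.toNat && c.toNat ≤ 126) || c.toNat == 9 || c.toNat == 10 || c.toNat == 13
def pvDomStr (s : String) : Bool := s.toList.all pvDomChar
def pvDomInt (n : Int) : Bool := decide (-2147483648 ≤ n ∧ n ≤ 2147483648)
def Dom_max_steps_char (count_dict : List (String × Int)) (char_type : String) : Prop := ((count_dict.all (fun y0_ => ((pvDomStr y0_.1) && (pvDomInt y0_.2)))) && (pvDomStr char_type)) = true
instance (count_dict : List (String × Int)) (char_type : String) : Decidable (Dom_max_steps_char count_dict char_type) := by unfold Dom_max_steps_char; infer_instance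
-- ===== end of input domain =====

-- B replaces A's restart-on-every-merge while-loop by a single pass over the
-- ambiguity codes (objective: simpler). Shared module-level constants of both Pythons:

def nuclAmbCodes : List (String × List String) :=
  [("R", ["A", "G"]), ("Y", ["C", "T"]), ("S", ["G", "C"]), ("W", ["A", "T"]),
   ("K", ["G", "T"]), ("M", ["A", "C"]), ("B", ["C", "G", "T"]), ("D", ["A", "G", "T"]),
   ("H", ["A", "C", "T"]), ("V", ["A", "C", "G"]), ("N", ["A", "C", "G", "T"])]

def protAmbCodes : List (String × List String) :=
  [("B", ["D", "N"]), ("J", ["I", "L"]),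
   ("X", ["A", "C", "D", "E", "F", "G", "H", "I", "K", "L", "M", "N", "P",
          "Q", "R", "S", "T", "V", "W", "Y"]),
   ("Z", ["E", "Q"])]

def nuclStand : List String := ["A", "C", "G", "T"]

def protStand : List String :=
  ["A", "C", "D", "E", "F", "G", "H", "I", "K", "L",
   "M", "N", "P", "Q", "R", "S", "T", "V", "W", "Y"]

-- ===== PORT A =====
-- dict operations are rendered as first-match association-list operations (exact
-- for the unique-key lists admitted by Pre_); `projector[amb]` is rendered with
-- default [] — exact under Pre_, which excludes the inputs where Python raises KeyError.

-- d[k] (first match, default 0)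
def lookD (d : List (String × Int)) (k : String) : Int :=
  ((d.find? (fun p => p.1 == k)).map (fun p => p.2)).getD 0

-- projector[amb] (default [] outside Pre_'s admitted keys)
def projGet (proj : List (String × List String)) (k : String) : List String :=
  ((proj.find? (fun p => p.1 == k)).map (fun p => p.2)).getD []

-- {x: d[x] for x in sorted(d, reverse=True, key=lambda y: d[y])}
def pySortDescByVal (d : List (String × Int)) : List (String × Int) :=
  (PySem.List.sorted (d.map Prod.fst) (fun y => lookD d y) true).map (fun x => (x, lookD d x))

-- inner loop: for sym in new_count: if sym in projector[amb]: break
def findSymA (proj : List (String × List String)) (newcKeys : List String) (amb : String) : Option String :=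
  newcKeys.find? (fun sym => (projGet proj amb).contains sym)

-- one pass of the while-body: first amb (with its sym) that matches, if any
def findAmbA (proj : List (String × List String)) (newcKeys : List String) : List String → Option (String × String)
  | [] => none
  | amb :: rest =>
    match findSymA proj newcKeys amb with
    | some sym => some (amb, sym)
    | none => findAmbA proj newcKeys rest

theorem findAmbA_some_mem (proj : List (String × List String)) (ks : List String)
    (l : List String) (amb sym : String) :
    findAmbA proj ks l = some (amb, sym) → amb ∈ l := by
  induction l with
  | nil => intro h; simp [findAmbA] at h
  | cons a t ih =>
    intro h
    simp only [findAmbA] at h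
    cases hf : findSymA proj ks a with
    | some s => rw [hf] at h; simp at h; simp [h.1]
    | none => rw [hf] at h; exact List.mem_cons_of_mem _ (ih h)

-- the while-loop: fold one amb per pass, restart, until a full pass matches nothing
def loopA (proj : List (String × List String)) (newc ambs : List (String × Int)) :
    List (String × Int) × List (String × Int) :=
  match h : findAmbA proj (newc.map Prod.fst) (ambs.map Prod.fst) with
  | none => (newc, ambs)
  | some (amb, _sym) =>
    loopA proj
      (newc.map (fun p => if p.1 = _sym then (p.1, p.2 + lookD ambs amb) else p))
      (ambs.filter (fun p => !(p.1 == amb)))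
termination_by ambs.length
decreasing_by
  have hmem : amb ∈ ambs.map Prod.fst := findAmbA_some_mem _ _ _ _ _ h
  obtain ⟨p, hp, hfst⟩ := List.mem_map.1 hmem
  simp only [List.length_unattach]
  rw [show ambs.length = ambs.attach.length from (List.length_attach (l := ambs)).symm]
  refine List.length_filter_lt_length_iff_exists.2 ⟨⟨p, hp⟩, List.mem_attach _ _, ?_⟩
  simp [hfst]

def goA (stand : List String) (proj : List (String × List String))
    (count_dict : List (String × Int)) : Int :=
  let cd := pySortDescByVal count_dict
  let newc := cd.filter (fun p => stand.contains p.1)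
  let ambs := cd.filter (fun p => !(stand.contains p.1))
  let r := loopA proj newc ambs
  if r.2.length > 0 then
    (((pySortDescByVal (r.1 ++ r.2)).map Prod.snd).drop 1).sum
  else ((r.1.map Prod.snd).drop 1).sum

def max_steps_char (count_dict : List (String × Int)) (char_type : String) : Int :=
  if char_type = "nucleic" ∨ char_type = "peptidic" then
    if char_type = "nucleic" then goA nuclStand nuclAmbCodes count_dict
    else goA protStand protAmbCodes count_dict
  else (((pySortDescByVal count_dict).map Prod.snd).drop 1).sum

-- ===== PORT B =====
-- Source B: one stable descending sort of the items, one pass folding each ambiguity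
-- code into the first present standard state it projects onto.

-- inner for/else over the new_count cells: add v to the first matching cell
def addFirstB (proj : List (String × List String)) (k : String) (v : Int) :
    List (String × Int) → Option (List (String × Int))
  | [] => none
  | p :: t =>
    if (projGet proj k).contains p.1 then some ((p.1, p.2 + v) :: t)
    else (addFirstB proj k v t).map (fun r => p :: r)

def stepB (proj : List (String × List String)) (stand : List String)
    (st : List (String × Int) × List Int) (p : String × Int) : List (String × Int) × List Int :=
  if stand.contains p.1 then st
  else
    match addFirstB proj p.1 p.2 st.1 with
    | some nc => (nc, st.2)
    | none => (st.1, st.2 ++ [p.2])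

def goB (stand : List String) (proj : List (String × List String))
    (items : List (String × Int)) : Int :=
  let st := items.foldl (stepB proj stand) (items.filter (fun p => stand.contains p.1), [])
  let vals := st.1.map Prod.snd ++ st.2
  let vals2 := if st.2 ≠ [] then PySem.List.sorted vals (fun v => v) true else vals
  (vals2.drop 1).sum

def max_steps_char_alt (count_dict : List (String × Int)) (char_type : String) : Int :=
  let items := PySem.List.sorted count_dict (fun kv => kv.2) true
  if char_type = "nucleic" then goB nuclStand nuclAmbCodes items
  else if char_type = "peptidic" then goB protStand protAmbCodes items
  else ((items.map Prod.snd).drop 1).sum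

-- ===== PRECONDITION & SPEC =====
-- Pre_ excludes (a) duplicate-key lists, which do not represent a Python dict
-- (both Pythons receive a dict, so such a list never reaches them faithfully), and
-- (b) the inputs on which Python A raises KeyError — char_type 'nucleic'/'peptidic'
-- with a standard state present together with a key that is neither a standard
-- state nor an ambiguity code (B raises KeyError there too).
def Pre_max_steps_char (count_dict : List (String × Int)) (char_type : String) : Prop :=
  (count_dict.map Prod.fst).Nodup ∧
  (char_type = "nucleic" →
    ((∀ p ∈ count_dict, p.1 ∈ nuclStand ∨ p.1 ∈ nuclAmbCodes.map Prod.fst) ∨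
     (∀ p ∈ count_dict, p.1 ∉ nuclStand))) ∧
  (char_type = "peptidic" →
    ((∀ p ∈ count_dict, p.1 ∈ protStand ∨ p.1 ∈ protAmbCodes.map Prod.fst) ∨
     (∀ p ∈ count_dict, p.1 ∉ protStand)))

instance (count_dict : List (String × Int)) (char_type : String) :
    Decidable (Pre_max_steps_char count_dict char_type) := by
  unfold Pre_max_steps_char; infer_instance

def pvWitness_max_steps_char : (List (String × Int)) × String :=
  ([("A", 3), ("R", 2), ("C", 1)], "nucleic")

def Spec_max_steps_char (count_dict : List (String × Int)) (char_type : String) (out : Int) : Prop := out = max_steps_char_alt count_dict char_type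
instance (count_dict : List (String × Int)) (char_type : String) (out : Int) : Decidable (Spec_max_steps_char count_dict char_type out) := by unfold Spec_max_steps_char; infer_instance

-- ===== CLAIM (what is proved, stated in full; the proofs are below) =====
def Claim_equal_max_steps_char : Prop := ∀ (count_dict : List (String × Int)) (char_type : String), Dom_max_steps_char count_dict char_type → Pre_max_steps_char count_dict char_type → Spec_max_steps_char count_dict char_type (max_steps_char count_dict char_type)

-- ===== LEMMAS AND PROOFS =====


-- key lookup of a member under unique keys
theorem lookD_of_mem (d : List (String × Int)) (p : String × Int)
    (hnd : (d.map Prod.fst).Nodup) (hp : p ∈ d) : lookD d p.1 = p.2 := by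
  induction d with
  | nil => cases hp
  | cons q t ih =>
    simp only [List.map_cons, List.nodup_cons] at hnd
    rcases List.mem_cons.1 hp with rfl | hpt
    · simp [lookD]
    · have hne : ¬ (q.1 == p.1) := by
        simp only [beq_iff_eq]
        intro he
        exact hnd.1 (he ▸ List.mem_map_of_mem hpt)
      simp only [lookD, List.find?_cons, hne]
      simpa [lookD] using ih hnd.2 hpt

theorem insertBy_map {α β : Type} (g : α → β) (before : β → β → Bool) (x : α) (l : List α) :
    PySem.List.insertBy before (g x) (l.map g) =
      (PySem.List.insertBy (fun a b => before (g a) (g b)) x l).map g := by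
  induction l with
  | nil => simp [PySem.List.insertBy]
  | cons y t ih =>
    simp only [List.map_cons, PySem.List.insertBy]
    by_cases hb : before (g x) (g y)
    · simp [hb]
    · simp [hb, ih]

theorem sorted_rev_map {α β κ : Type} [LT κ] [DecidableLT κ]
    (g : α → β) (key : β → κ) (l : List α) :
    PySem.List.sorted (l.map g) key true =
      (PySem.List.sorted l (fun a => key (g a)) true).map g := by
  rw [PySem.List.sorted_rev_eq_foldl_insertBy, PySem.List.sorted_rev_eq_foldl_insertBy]
  suffices h : ∀ (l : List α) (acc : List α),
      (l.map g).foldl (fun acc x => PySem.List.insertBy (fun a b => decide (key b < key a)) x acc) (acc.map g) =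
      (l.foldl (fun acc x => PySem.List.insertBy (fun a b => decide (key (g b) < key (g a))) x acc) acc).map g by
    simpa using h l []
  intro l
  induction l with
  | nil => simp
  | cons x t ih =>
    intro acc
    simp only [List.map_cons, List.foldl_cons]
    rw [insertBy_map g (fun a b => decide (key b < key a)) x acc]
    exact ih _

theorem insertBy_congr {α : Type} (before before' : α → α → Bool) (x : α) (acc : List α)
    (h : ∀ y ∈ acc, before x y = before' x y) :
    PySem.List.insertBy before x acc = PySem.List.insertBy before' x acc := by
  induction acc with
  | nil => rfl
  | cons y t ih =>
    simp only [PySem.List.insertBy]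
    rw [h y (by simp)]
    by_cases hb : before' x y
    · simp [hb]
    · simp [hb, ih (fun z hz => h z (by simp [hz]))]

theorem sorted_rev_congr {α κ : Type} [LT κ] [DecidableLT κ]
    (l : List α) (k k' : α → κ) (h : ∀ a ∈ l, k a = k' a) :
    PySem.List.sorted l k true = PySem.List.sorted l k' true := by
  rw [PySem.List.sorted_rev_eq_foldl_insertBy, PySem.List.sorted_rev_eq_foldl_insertBy]
  suffices hh : ∀ (l : List α) (acc : List α), (∀ a ∈ l, k a = k' a) → (∀ a ∈ acc, k a = k' a) →
      l.foldl (fun acc x => PySem.List.insertBy (fun a b => decide (k b < k a)) x acc) acc =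
      l.foldl (fun acc x => PySem.List.insertBy (fun a b => decide (k' b < k' a)) x acc) acc by
    exact hh l [] h (by simp)
  intro l
  induction l with
  | nil => simp
  | cons x t ih =>
    intro acc hl hacc
    simp only [List.foldl_cons]
    have hx : k x = k' x := hl x (by simp)
    have hstep : PySem.List.insertBy (fun a b => decide (k b < k a)) x acc =
        PySem.List.insertBy (fun a b => decide (k' b < k' a)) x acc := by
      refine insertBy_congr _ _ _ _ (fun y hy => ?_)
      rw [hx, hacc y hy]
    rw [hstep]
    refine ih _ (fun a ha => hl a (by simp [ha])) (fun a ha => ?_)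
    rcases (PySem.List.mem_insertBy _ _ _ _).1 ha with rfl | hy
    · exact hx
    · exact hacc a hy


theorem pySortDescByVal_eq (d : List (String × Int)) (hnd : (d.map Prod.fst).Nodup) :
    pySortDescByVal d = PySem.List.sorted d (fun p => p.2) true := by
  unfold pySortDescByVal
  rw [sorted_rev_map Prod.fst (fun y => lookD d y) d]
  have hcongr : PySem.List.sorted d (fun a => lookD d a.1) true =
      PySem.List.sorted d (fun p => p.2) true :=
    sorted_rev_congr d _ _ (fun p hp => lookD_of_mem d p hnd hp)
  rw [hcongr, List.map_map]
  refine List.map_congr_left (fun p hp => ?_) |>.trans (List.map_id _)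
  have hpd : p ∈ d := (PySem.List.mem_sorted _ _ _ _).1 hp
  simp [Function.comp, lookD_of_mem d p hnd hpd]

theorem map_snd_sorted (L : List (String × Int)) :
    (PySem.List.sorted L (fun p => p.2) true).map Prod.snd =
      PySem.List.sorted (L.map Prod.snd) (fun v => v) true := by
  rw [sorted_rev_map Prod.snd (fun v => v) L]


-- proof-side view of B's step without the standard-state guard
def stepN (proj : List (String × List String)) (st : List (String × Int) × List Int)
    (p : String × Int) : List (String × Int) × List Int :=
  match addFirstB proj p.1 p.2 st.1 with
  | some nc => (nc, st.2)
  | none => (st.1, st.2 ++ [p.2])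

theorem stepB_eq (proj : List (String × List String)) (stand : List String)
    (st : List (String × Int) × List Int) (p : String × Int) :
    stepB proj stand st p = if stand.contains p.1 then st else stepN proj st p := rfl

theorem foldl_stepB_filter (proj : List (String × List String)) (stand : List String) :
    ∀ (l : List (String × Int)) (st : List (String × Int) × List Int),
      l.foldl (stepB proj stand) st =
        (l.filter (fun p => !(stand.contains p.1))).foldl (stepN proj) st := by
  intro l
  induction l with
  | nil => intro st; rfl
  | cons p t ih =>
    intro st
    by_cases hc : p.1 ∈ stand
    · simp [List.foldl_cons, hc, stepB_eq, ih]
    · simp [List.foldl_cons, hc, stepB_eq, ih]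

-- fst-projection of A's dict-update map
theorem keys_upd (nc : List (String × Int)) (sym : String) (v : Int) :
    (nc.map (fun p => if p.1 = sym then (p.1, p.2 + v) else p)).map Prod.fst = nc.map Prod.fst := by
  rw [List.map_map]
  refine List.map_congr_left (fun p _ => ?_)
  by_cases h : p.1 = sym <;> simp [Function.comp, h]

-- B's inner for/else IS A's find-first-symbol followed by A's dict update
theorem addFirstB_eq (proj : List (String × List String)) (k : String) (v : Int)
    (nc : List (String × Int)) (hnd : (nc.map Prod.fst).Nodup) :
    addFirstB proj k v nc =
      (findSymA proj (nc.map Prod.fst) k).map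
        (fun sym => nc.map (fun p => if p.1 = sym then (p.1, p.2 + v) else p)) := by
  induction nc with
  | nil => simp [addFirstB, findSymA]
  | cons p t ih =>
    simp only [List.map_cons, List.nodup_cons] at hnd
    by_cases hc : (projGet proj k).contains p.1
    · have hfind : findSymA proj ((p :: t).map Prod.fst) k = some p.1 := by
        unfold findSymA
        rw [List.map_cons, List.find?_cons_of_pos hc]
      rw [hfind]
      have ht : t.map (fun q => if q.1 = p.1 then (q.1, q.2 + v) else q) = t := by
        refine List.map_congr_left (fun q hq => ?_) |>.trans (List.map_id _)
        have : q.1 ≠ p.1 := fun he => hnd.1 (he ▸ List.mem_map_of_mem hq)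
        simp [this]
      have hc' : p.1 ∈ projGet proj k := by simpa using hc
      simp [addFirstB, hc', ht]
    · simp only [addFirstB, hc]
      rw [ih hnd.2]
      unfold findSymA
      rw [List.map_cons, List.find?_cons_of_neg (by simpa using hc)]
      cases hf : (t.map Prod.fst).find? (fun sym => (projGet proj k).contains sym) with
      | none => simp
      | some sym =>
        have hsymmem : sym ∈ t.map Prod.fst := List.mem_of_find?_eq_some hf
        have hne : p.1 ≠ sym := fun he => hnd.1 (he ▸ hsymmem)
        simp [hne]

theorem stepN_keys (proj : List (String × List String)) (st : List (String × Int) × List Int)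
    (p : String × Int) (hnd : (st.1.map Prod.fst).Nodup) :
    ((stepN proj st p).1).map Prod.fst = st.1.map Prod.fst := by
  unfold stepN
  rw [addFirstB_eq proj p.1 p.2 st.1 hnd]
  cases hf : findSymA proj (st.1.map Prod.fst) p.1 with
  | none => simp
  | some sym => simpa using keys_upd st.1 sym p.2


theorem foldl_stepN_keys (proj : List (String × List String)) :
    ∀ (l : List (String × Int)) (st : List (String × Int) × List Int),
      (st.1.map Prod.fst).Nodup →
      ((l.foldl (stepN proj) st).1).map Prod.fst = st.1.map Prod.fst := by
  intro l
  induction l with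
  | nil => intro st _; rfl
  | cons p t ih =>
    intro st hnd
    rw [List.foldl_cons]
    have hk := stepN_keys proj st p hnd
    rw [ih _ (hk ▸ hnd), hk]

theorem foldl_stepN_split (proj : List (String × List String)) :
    ∀ (l : List (String × Int)) (nc : List (String × Int)) (racc : List Int),
      l.foldl (stepN proj) (nc, racc) =
        ((l.foldl (stepN proj) (nc, [])).1, racc ++ (l.foldl (stepN proj) (nc, [])).2) := by
  intro l
  induction l with
  | nil => intro nc racc; simp
  | cons p t ih =>
    intro nc racc
    rw [List.foldl_cons, List.foldl_cons]
    cases hf : addFirstB proj p.1 p.2 nc with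
    | some nc' =>
      have h1 : stepN proj (nc, racc) p = (nc', racc) := by unfold stepN; rw [hf]
      have h2 : stepN proj (nc, []) p = (nc', []) := by unfold stepN; rw [hf]
      rw [h1, h2, ih nc' racc]
    | none =>
      have h1 : stepN proj (nc, racc) p = (nc, racc ++ [p.2]) := by unfold stepN; rw [hf]
      have h2 : stepN proj (nc, []) p = (nc, [p.2]) := by unfold stepN; rw [hf]; rfl
      rw [h1, h2, ih nc (racc ++ [p.2]), ih nc [p.2]]
      simp

theorem foldl_stepN_rest (proj : List (String × List String)) :
    ∀ (l : List (String × Int)) (nc : List (String × Int)) (racc : List Int),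
      (nc.map Prod.fst).Nodup →
      (l.foldl (stepN proj) (nc, racc)).2 =
        racc ++ (l.filter (fun p => (findSymA proj (nc.map Prod.fst) p.1).isNone)).map Prod.snd := by
  intro l
  induction l with
  | nil => intro nc racc _; simp
  | cons p t ih =>
    intro nc racc hnd
    rw [List.foldl_cons]
    have haf := addFirstB_eq proj p.1 p.2 nc hnd
    cases hf : findSymA proj (nc.map Prod.fst) p.1 with
    | some sym =>
      have hstep : stepN proj (nc, racc) p =
          (nc.map (fun q => if q.1 = sym then (q.1, q.2 + p.2) else q), racc) := by
        unfold stepN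
        rw [haf, hf]
        rfl
      rw [hstep]
      have hk := keys_upd nc sym p.2
      rw [ih _ racc (hk ▸ hnd), hk]
      simp [hf]
    | none =>
      have hstep : stepN proj (nc, racc) p = (nc, racc ++ [p.2]) := by
        unfold stepN
        rw [haf, hf]
        rfl
      rw [hstep, ih _ _ hnd]
      simp [hf]

theorem foldl_stepN_none (proj : List (String × List String)) :
    ∀ (l : List (String × Int)) (nc : List (String × Int)) (racc : List Int),
      (nc.map Prod.fst).Nodup →
      (∀ p ∈ l, findSymA proj (nc.map Prod.fst) p.1 = none) →
      (l.foldl (stepN proj) (nc, racc)).1 = nc := by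
  intro l
  induction l with
  | nil => intro nc racc _ _; rfl
  | cons p t ih =>
    intro nc racc hnd hall
    rw [List.foldl_cons]
    have hstep : stepN proj (nc, racc) p = (nc, racc ++ [p.2]) := by
      unfold stepN
      rw [addFirstB_eq proj p.1 p.2 nc hnd, hall p (by simp)]
      rfl
    rw [hstep]
    exact ih nc _ hnd (fun q hq => hall q (by simp [hq]))

theorem findAmbA_none_iff (proj : List (String × List String)) (ks : List String) :
    ∀ (l : List String), findAmbA proj ks l = none ↔ ∀ k ∈ l, findSymA proj ks k = none := by
  intro l
  induction l with
  | nil => simp [findAmbA]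
  | cons a t ih =>
    simp only [findAmbA]
    cases hf : findSymA proj ks a with
    | some s => simp [hf]
    | none => simp [ih, hf]
      
theorem findAmbA_some_split (proj : List (String × List String)) (ks : List String) :
    ∀ (l : List String) (amb sym : String), findAmbA proj ks l = some (amb, sym) →
      ∃ pre post, l = pre ++ amb :: post ∧ (∀ k ∈ pre, findSymA proj ks k = none) ∧
        findSymA proj ks amb = some sym := by
  intro l
  induction l with
  | nil => intro amb sym h; simp [findAmbA] at h
  | cons a t ih =>
    intro amb sym h
    simp only [findAmbA] at h
    cases hf : findSymA proj ks a with
    | some s =>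
      rw [hf] at h
      simp only [Option.some.injEq, Prod.mk.injEq] at h
      exact ⟨[], t, by simp [← h.1], by simp, by rw [h.1] at hf; rw [hf, h.2]⟩
    | none =>
      rw [hf] at h
      obtain ⟨pre, post, hsplit, hpre, hamb⟩ := ih amb sym h
      exact ⟨a :: pre, post, by simp [hsplit], by
        intro k hk
        rcases List.mem_cons.1 hk with rfl | hk'
        · exact hf
        · exact hpre k hk', hamb⟩


theorem foldl_stepN_fst (proj : List (String × List String)) (l : List (String × Int))
    (nc : List (String × Int)) (racc : List Int) :
    (l.foldl (stepN proj) (nc, racc)).1 = (l.foldl (stepN proj) (nc, [])).1 := by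
  rw [foldl_stepN_split]

-- A's while-loop computes exactly B's single pass (first components), leaving
-- exactly the never-matching ambiguity codes behind
theorem loopA_eq (proj : List (String × List String)) (ambs nc : List (String × Int))
    (h1 : (nc.map Prod.fst).Nodup) (h2 : (ambs.map Prod.fst).Nodup) :
    loopA proj nc ambs =
      ((ambs.foldl (stepN proj) (nc, [])).1,
       ambs.filter (fun p => (findSymA proj (nc.map Prod.fst) p.1).isNone)) := by
  rw [loopA.eq_def]
  split
  next hfa =>
    have hall : ∀ p ∈ ambs, findSymA proj (nc.map Prod.fst) p.1 = none := fun p hp =>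
      (findAmbA_none_iff proj _ _).1 hfa _ (List.mem_map_of_mem hp)
    have e1 : (ambs.foldl (stepN proj) (nc, [])).1 = nc := foldl_stepN_none proj ambs nc [] h1 hall
    have e2 : ambs.filter (fun p => (findSymA proj (nc.map Prod.fst) p.1).isNone) = ambs :=
      List.filter_eq_self.2 (fun p hp => by simp [hall p hp])
    rw [e1, e2]
  next amb sym hfa =>
    obtain ⟨pre, post, hsplit, hpre, hamb⟩ := findAmbA_some_split proj _ _ amb sym hfa
    obtain ⟨preL, rest, hambs, hpreL, hrest⟩ := List.map_eq_append_iff.1 hsplit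
    obtain ⟨p0, postL, hrest2, hp0, hpostL⟩ := List.map_eq_cons_iff.1 hrest
    subst hrest2
    subst hambs
    -- keys facts
    have h2s : (pre ++ amb :: post).Nodup := hsplit ▸ h2
    have hnda := List.nodup_append.1 h2s
    have hambpre : amb ∉ pre := fun hmem => hnda.2.2 amb hmem amb (by simp) rfl
    have hambpost : amb ∉ post := by
      have := hnda.2.1
      simp only [List.nodup_cons] at this
      exact this.1
    have hdisj : ∀ a ∈ pre, ∀ b ∈ post, a ≠ b := fun a ha b hb => hnda.2.2 a ha b (by simp [hb])
    -- the value folded in is p0's count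
    have hlook : lookD (preL ++ p0 :: postL) amb = p0.2 := by
      rw [← hp0]
      exact lookD_of_mem _ p0 h2 (by simp)
    rw [hlook]
    have hkeq : ((nc.map (fun p => if p.1 = sym then (p.1, p.2 + p0.2) else p)).map Prod.fst)
        = nc.map Prod.fst := keys_upd nc sym p0.2
    have h1' : (((nc.map (fun p => if p.1 = sym then (p.1, p.2 + p0.2) else p)).map Prod.fst)).Nodup := by
      rw [hkeq]; exact h1
    have hfilt : (preL ++ p0 :: postL).filter (fun p => !(p.1 == amb)) = preL ++ postL := by
      rw [List.filter_append, List.filter_cons]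
      have hp0amb : (!(p0.1 == amb)) = false := by simp [hp0]
      rw [hp0amb]
      have hpref : preL.filter (fun p => !(p.1 == amb)) = preL :=
        List.filter_eq_self.2 (fun q hq => by
          have hqp : q.1 ∈ pre := hpreL ▸ List.mem_map_of_mem hq
          have hne : q.1 ≠ amb := fun he => hambpre (he ▸ hqp)
          simp [hne])
      have hpostf : postL.filter (fun p => !(p.1 == amb)) = postL :=
        List.filter_eq_self.2 (fun q hq => by
          have hqp : q.1 ∈ post := hpostL ▸ List.mem_map_of_mem hq
          have hne : q.1 ≠ amb := fun he => hambpost (he ▸ hqp)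
          simp [hne])
      rw [hpref, hpostf]
      simp
    rw [hfilt]
    have h2' : (((preL ++ postL).map Prod.fst)).Nodup := by
      rw [List.map_append, hpreL, hpostL]
      exact List.nodup_append.2 ⟨hnda.1, (by
        have := hnda.2.1
        simp only [List.nodup_cons] at this
        exact this.2), hdisj⟩
    rw [loopA_eq proj (preL ++ postL) _ h1' h2']
    have hprenone : ∀ q ∈ preL, findSymA proj (nc.map Prod.fst) q.1 = none := fun q hq =>
      hpre q.1 (hpreL ▸ List.mem_map_of_mem hq)
    refine Prod.ext ?_ ?_
    · -- first components
      dsimp only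
      rw [List.foldl_append, List.foldl_append, List.foldl_cons]
      have hS1 : (preL.foldl (stepN proj)
          ((nc.map (fun p => if p.1 = sym then (p.1, p.2 + p0.2) else p)), [])).1
          = nc.map (fun p => if p.1 = sym then (p.1, p.2 + p0.2) else p) :=
        foldl_stepN_none proj preL _ [] h1' (fun q hq => by rw [hkeq]; exact hprenone q hq)
      have hT1 : (preL.foldl (stepN proj) (nc, [])).1 = nc :=
        foldl_stepN_none proj preL nc [] h1 hprenone
      rw [show preL.foldl (stepN proj)
            ((nc.map (fun p => if p.1 = sym then (p.1, p.2 + p0.2) else p)), [])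
          = ((nc.map (fun p => if p.1 = sym then (p.1, p.2 + p0.2) else p)),
             (preL.foldl (stepN proj) ((nc.map (fun p => if p.1 = sym then (p.1, p.2 + p0.2) else p)), [])).2)
          from Prod.ext_iff.2 ⟨hS1, rfl⟩]
      rw [show preL.foldl (stepN proj) (nc, [])
          = (nc, (preL.foldl (stepN proj) (nc, [])).2) from Prod.ext_iff.2 ⟨hT1, rfl⟩]
      have hstep : stepN proj (nc, (preL.foldl (stepN proj) (nc, [])).2) p0
          = ((nc.map (fun p => if p.1 = sym then (p.1, p.2 + p0.2) else p)),
             (preL.foldl (stepN proj) (nc, [])).2) := by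
        unfold stepN
        rw [addFirstB_eq proj p0.1 p0.2 nc h1, hp0, hamb]
        rfl
      rw [hstep]
      exact (foldl_stepN_fst proj postL _ _).trans (foldl_stepN_fst proj postL _ _).symm
    · -- second components
      dsimp only
      rw [List.filter_append, List.filter_append, List.filter_cons]
      have hp0f : ((findSymA proj (nc.map Prod.fst) p0.1).isNone : Bool) = false := by
        rw [hp0, hamb]; rfl
      have hpref : ∀ (f : String × Int → Bool), (∀ q ∈ preL, f q = true) → preL.filter f = preL :=
        fun f hf => List.filter_eq_self.2 hf
      rw [hpref _ (fun q hq => by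
            rw [hkeq, hprenone q hq]; rfl),
          hpref _ (fun q hq => by rw [hprenone q hq]; rfl), hp0f]
      have : (postL.filter (fun p => (findSymA proj
          (((nc.map (fun p => if p.1 = sym then (p.1, p.2 + p0.2) else p)).map Prod.fst)) p.1).isNone))
          = postL.filter (fun p => (findSymA proj (nc.map Prod.fst) p.1).isNone) := by
        rw [hkeq]
      rw [this]
      simp
termination_by ambs.length
decreasing_by
  simp only [hambs, List.length_append, List.length_cons]
  omega
  

theorem goA_eq_goB (stand : List String) (proj : List (String × List String))
    (cd : List (String × Int)) (hnd : (cd.map Prod.fst).Nodup) :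
    goA stand proj cd = goB stand proj (PySem.List.sorted cd (fun p => p.2) true) := by
  have hS := pySortDescByVal_eq cd hnd
  have hSperm : (PySem.List.sorted cd (fun p => p.2) true).Perm cd :=
    PySem.List.sorted_perm cd (fun p => p.2) true
  have hSnd : ((PySem.List.sorted cd (fun p => p.2) true).map Prod.fst).Nodup :=
    (hSperm.map Prod.fst).nodup_iff.2 hnd
  unfold goA goB
  dsimp only
  rw [hS]
  set S := PySem.List.sorted cd (fun p => p.2) true with hSdef
  set newc := S.filter (fun p => stand.contains p.1) with hnewc
  set ambs := S.filter (fun p => !(stand.contains p.1)) with hambs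
  have hnewcK : (newc.map Prod.fst).Nodup :=
    hSnd.sublist ((S.filter_sublist).map Prod.fst)
  have hambsK : (ambs.map Prod.fst).Nodup :=
    hSnd.sublist ((S.filter_sublist).map Prod.fst)
  rw [loopA_eq proj ambs newc hnewcK hambsK]
  rw [foldl_stepB_filter proj stand S (newc, [])]
  rw [foldl_stepN_rest proj ambs newc [] hnewcK]
  set F1 := (ambs.foldl (stepN proj) (newc, [])).1 with hF1
  set R := ambs.filter (fun p => (findSymA proj (newc.map Prod.fst) p.1).isNone) with hR
  have hF1K : F1.map Prod.fst = newc.map Prod.fst := foldl_stepN_keys proj ambs (newc, []) hnewcK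
  by_cases hRe : R = []
  · simp [hRe]
  · have hRlen : R.length > 0 := List.length_pos_iff.2 hRe
    have hRm : ([] : List Int) ++ R.map Prod.snd ≠ [] := by simp [hRe]
    rw [if_pos hRlen, if_pos hRm]
    have hRK : (R.map Prod.fst).Nodup :=
      hambsK.sublist ((List.filter_sublist (l := ambs)).map Prod.fst)
    have hdisj : ∀ a ∈ F1.map Prod.fst, ∀ b ∈ R.map Prod.fst, a ≠ b := by
      intro a ha b hb
      rw [hF1K] at ha
      obtain ⟨p, hp, rfl⟩ := List.mem_map.1 ha
      obtain ⟨q, hq, rfl⟩ := List.mem_map.1 hb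
      have hpc : stand.contains p.1 = true := by
        have hh := hp; rw [hnewc] at hh; exact (List.mem_filter.1 hh).2
      have hqa : q ∈ ambs := List.mem_of_mem_filter hq
      have hqc : (!(stand.contains q.1)) = true := by
        have hh := hqa; rw [hambs] at hh; exact (List.mem_filter.1 hh).2
      intro he
      rw [he] at hpc
      rw [hpc] at hqc
      simp at hqc
    have hK : ((F1 ++ R).map Prod.fst).Nodup := by
      rw [List.map_append]
      exact List.nodup_append.2 ⟨hF1K ▸ hnewcK, hRK, hdisj⟩
    rw [pySortDescByVal_eq _ hK, map_snd_sorted, List.map_append]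
    simp

theorem max_steps_char_spec : Claim_equal_max_steps_char := by
  intro cd ct _hdom hpre
  unfold Spec_max_steps_char max_steps_char max_steps_char_alt
  obtain ⟨hnd, -, -⟩ := hpre
  by_cases h1 : ct = "nucleic"
  · rw [if_pos (Or.inl h1), if_pos h1, if_pos h1]
    exact goA_eq_goB nuclStand nuclAmbCodes cd hnd
  · by_cases h2 : ct = "peptidic"
    · rw [if_pos (Or.inr h2), if_neg h1, if_neg h1, if_pos h2]
      exact goA_eq_goB protStand protAmbCodes cd hnd
    · rw [if_neg (by simp [h1, h2]), if_neg h1, if_neg h2]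
      rw [pySortDescByVal_eq cd hnd]
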